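-- pv_equiv track=rewrite | github.com/TheArtbot/All-My-Projects | Python Code/PyCOdes/AlphaBeta&MinMax/WastingWater.py | stringSubtract
-- ===== SOURCE A (Python) =====
-- def stringSubtract(str1 = "",str2 = "", allCase = False):
--     for s in str2:
--         checkS = str1
--         str1 = str1.replace(s,'',1)
--         if not(allCase):
--             continue
--         if checkS == str1:
--             str1 = str1.replace(s.lower(),'',1)
--         if checkS == str1:
--             str1 = str1.replace(s.upper(),'',1)
--     return str1
-- ===== SOURCE B (Python) =====
-- def stringSubtract(str1="", str2="", allCase=False):
--     avail = {}
--     for c in str1: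
--         avail[c] = avail.get(c, 0) + 1
--     need = {}
--
--     def take(c):
--         if avail.get(c, 0) > 0:
--             avail[c] = avail.get(c, 0) - 1
--             need[c] = need.get(c, 0) + 1
--             return True
--         return False
--
--     for s in str2:
--         if take(s):
--             continue
--         if allCase:
--             if take(s.lower()):
--                 continue
--             take(s.upper())
--
--     out = []
--     for c in str1:
--         if need.get(c, 0) > 0:
--             need[c] = need.get(c, 0) - 1
--         else:
--             out.append(c)
--     return "".join(out)
-- ===== Notes on version B (the rewrite author's own statement) =====
-- stated objective: faster
-- what changed: Instead of scanning str1 with str.replace for every character of str2 (re-copying the string each step), B counts available occurrences in one pass, resolves all removals (with the lower/upper-case fallback) on counters, and deletes the first k occurrences of each character in a single output pass.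
import Mathlib
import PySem

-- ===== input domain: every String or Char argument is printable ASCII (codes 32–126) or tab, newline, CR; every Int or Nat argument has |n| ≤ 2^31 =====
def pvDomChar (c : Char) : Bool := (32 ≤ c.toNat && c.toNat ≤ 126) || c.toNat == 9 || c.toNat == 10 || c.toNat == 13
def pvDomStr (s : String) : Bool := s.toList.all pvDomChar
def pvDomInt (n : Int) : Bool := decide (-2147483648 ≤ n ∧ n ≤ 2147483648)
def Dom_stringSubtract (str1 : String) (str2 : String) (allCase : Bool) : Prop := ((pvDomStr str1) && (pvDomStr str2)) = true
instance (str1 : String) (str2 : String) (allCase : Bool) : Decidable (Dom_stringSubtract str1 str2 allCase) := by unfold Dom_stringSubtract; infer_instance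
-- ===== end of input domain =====

-- B resolves all removals (with the case fallback) on occurrence counters and deletes
-- them in one output pass, instead of A's per-character str.replace scan of str1.


-- ===== PORT A =====
-- str1.replace(s, '', 1) for a single character s = remove the first occurrence of s;
-- hand-ported (PySem.Str.replace has no count argument), exact for a one-char pattern.
def pvRemoveFirst (c : Char) : List Char → List Char
  | [] => []
  | x :: xs => if x = c then xs else x :: pvRemoveFirst c xs

-- the body of A's `for s in str2` loop (current str1 is the fold state)
def pvStepA (allCase : Bool) (s1 : List Char) (s : Char) : List Char :=
  let checkS := s1
  let s1 := pvRemoveFirst s s1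
  if !allCase then s1
  else
    let s1 := if checkS = s1 then pvRemoveFirst (PySem.Chars.lowerChar s) s1 else s1
    if checkS = s1 then pvRemoveFirst (PySem.Chars.upperChar s) s1 else s1

def stringSubtract (str1 : String) (str2 : String) (allCase : Bool) : String :=
  String.ofList (str2.toList.foldl (pvStepA allCase) str1.toList)

-- ===== PORT B =====
-- Source B's `take(c)`: try to consume one remaining occurrence of c; returns (removed?, avail, need)
def pvTake (c : Char) (avail need : PySem.Dict Char Int) :
    Bool × PySem.Dict Char Int × PySem.Dict Char Int :=
  if avail.getD c 0 > 0 then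
    (true, avail.insert c (avail.getD c 0 - 1), need.insert c (need.getD c 0 + 1))
  else (false, avail, need)

-- the body of Source B's `for s in str2` loop
def pvStepB (allCase : Bool) (p : PySem.Dict Char Int × PySem.Dict Char Int) (s : Char) :
    PySem.Dict Char Int × PySem.Dict Char Int :=
  match pvTake s p.1 p.2 with
  | (true, a, n) => (a, n)
  | (false, a, n) =>
    if allCase then
      match pvTake (PySem.Chars.lowerChar s) a n with
      | (true, a, n) => (a, n)
      | (false, a, n) => (pvTake (PySem.Chars.upperChar s) a n).2
    else (a, n)

-- the body of Source B's final output loop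
def pvStepOut (p : PySem.Dict Char Int × List Char) (c : Char) :
    PySem.Dict Char Int × List Char :=
  if p.1.getD c 0 > 0 then (p.1.insert c (p.1.getD c 0 - 1), p.2) else (p.1, p.2 ++ [c])

def stringSubtract_alt (str1 : String) (str2 : String) (allCase : Bool) : String :=
  let avail := str1.toList.foldl (fun d c => d.insert c (d.getD c 0 + 1))
    (PySem.Dict.empty : PySem.Dict Char Int)
  let st := str2.toList.foldl (pvStepB allCase) (avail, (PySem.Dict.empty : PySem.Dict Char Int))
  String.ofList (str1.toList.foldl pvStepOut (st.2, ([] : List Char))).2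

-- ===== PRECONDITION & SPEC =====
def Spec_stringSubtract (str1 : String) (str2 : String) (allCase : Bool) (out : String) : Prop := out = stringSubtract_alt str1 str2 allCase
instance (str1 : String) (str2 : String) (allCase : Bool) (out : String) : Decidable (Spec_stringSubtract str1 str2 allCase out) := by unfold Spec_stringSubtract; infer_instance

-- ===== CLAIM (what is proved, stated in full; the proofs are below) =====
def Claim_equal_stringSubtract : Prop := ∀ (str1 : String) (str2 : String) (allCase : Bool), Dom_stringSubtract str1 str2 allCase → Spec_stringSubtract str1 str2 allCase (stringSubtract str1 str2 allCase)

-- ===== LEMMAS AND PROOFS =====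

-- remove, scanning left to right, the first (f c) occurrences of each character c
def pvRemoveF (f : Char → Nat) : List Char → List Char
  | [] => []
  | x :: xs => if 0 < f x then pvRemoveF (Function.update f x (f x - 1)) xs else x :: pvRemoveF f xs

theorem pvRemoveF_zero (xs : List Char) : pvRemoveF (fun _ => 0) xs = xs := by
  induction xs with
  | nil => rfl
  | cons x xs ih => simp [pvRemoveF, ih]

theorem pvRemoveFirst_of_count_zero (c : Char) (xs : List Char) (h : xs.count c = 0) :
    pvRemoveFirst c xs = xs := by
  induction xs with
  | nil => rfl
  | cons x xs ih =>
    simp only [List.count_cons, beq_iff_eq] at h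
    by_cases hx : x = c
    · simp [hx] at h
    · simp only [hx, if_false, add_zero] at h
      rw [pvRemoveFirst, if_neg hx, ih h]

theorem pvRemoveFirst_length (c : Char) (xs : List Char) (h : 0 < xs.count c) :
    (pvRemoveFirst c xs).length + 1 = xs.length := by
  induction xs with
  | nil => simp at h
  | cons x xs ih =>
    by_cases hx : x = c
    · simp [pvRemoveFirst, hx]
    · simp only [List.count_cons, beq_iff_eq, hx, if_false, add_zero] at h
      simp [pvRemoveFirst, hx, ih h]

theorem pvRemoveFirst_ne (c : Char) (xs : List Char) (h : 0 < xs.count c) :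
    pvRemoveFirst c xs ≠ xs := by
  intro he
  have := pvRemoveFirst_length c xs h
  rw [he] at this; omega

theorem pvRemoveFirst_count (c d : Char) (xs : List Char) (h : 0 < xs.count c) :
    (pvRemoveFirst c xs).count d = xs.count d - (if d = c then 1 else 0) := by
  induction xs with
  | nil => simp at h
  | cons x xs ih =>
    by_cases hx : x = c
    · subst hx
      by_cases hd : d = x
      · simp [pvRemoveFirst, List.count_cons, hd]
      · have hxd : ¬ x = d := fun hh => hd hh.symm
        simp [pvRemoveFirst, List.count_cons, hd, hxd]
    · simp only [List.count_cons, beq_iff_eq, hx, if_false, add_zero] at h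
      have hcnt := ih h
      by_cases hd : d = x
      · subst hd
        have hdc : d ≠ c := hx
        simp [pvRemoveFirst, hx, List.count_cons, hcnt, hdc]
      · have hxd : ¬ x = d := fun hh => hd hh.symm
        simp [pvRemoveFirst, hx, List.count_cons, hxd, hcnt]

theorem pvRemoveF_bump (c : Char) (f : Char → Nat) (xs : List Char) :
    pvRemoveFirst c (pvRemoveF f xs) = pvRemoveF (Function.update f c (f c + 1)) xs := by
  induction xs generalizing f with
  | nil => rfl
  | cons x xs ih =>
    by_cases hx : x = c
    · subst hx
      by_cases hf : 0 < f x
      · have h1 : (0:Nat) < Function.update f x (f x + 1) x := by simp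
        rw [pvRemoveF, if_pos hf, pvRemoveF, if_pos h1, ih]
        congr 1
        funext y
        by_cases hy : y = x
        · subst hy; simp [Function.update]; omega
        · simp [Function.update, hy]
      · have hf0 : f x = 0 := by omega
        have h1 : (0:Nat) < Function.update f x (f x + 1) x := by simp
        rw [pvRemoveF, if_neg hf, pvRemoveF, if_pos h1, pvRemoveFirst, if_pos rfl]
        congr 1
        funext y
        by_cases hy : y = x
        · subst hy; simp [Function.update, hf0]
        · simp [Function.update, hy]
    · have hcx : ¬ c = x := fun h => hx h.symm
      have hux : Function.update f c (f c + 1) x = f x := by simp [Function.update, hx]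
      by_cases hf : 0 < f x
      · rw [pvRemoveF, if_pos hf, pvRemoveF, hux, if_pos hf, ih]
        congr 1
        funext y
        by_cases hy : y = x
        · subst hy; simp [Function.update, hx, hcx]
        · by_cases hyc : y = c
          · subst hyc; simp [Function.update, hy, hcx]
          · simp [Function.update, hy, hyc]
      · rw [pvRemoveF, if_neg hf, pvRemoveF, hux, if_neg hf, pvRemoveFirst, if_neg hx, ih]

-- the loop invariant tying A's current string to B's (avail, need) pair
def pvInv (str1 s1 : List Char) (p : PySem.Dict Char Int × PySem.Dict Char Int) : Prop :=
  (∀ c, 0 ≤ p.2.getD c 0) ∧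
  s1 = pvRemoveF (fun c => (p.2.getD c 0).toNat) str1 ∧
  (∀ c, p.1.getD c 0 = (s1.count c : Int))

theorem pvTake_fail (c : Char) (str1 s1 : List Char) (p : PySem.Dict Char Int × PySem.Dict Char Int)
    (hinv : pvInv str1 s1 p) (h : s1.count c = 0) :
    pvTake c p.1 p.2 = (false, p.1, p.2) := by
  have hc := hinv.2.2 c
  rw [pvTake, if_neg]
  rw [hc, h]; simp

theorem pvTake_succ (c : Char) (str1 s1 : List Char) (p : PySem.Dict Char Int × PySem.Dict Char Int)
    (hinv : pvInv str1 s1 p) (h : 0 < s1.count c) :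
    pvTake c p.1 p.2 = (true, p.1.insert c (p.1.getD c 0 - 1), p.2.insert c (p.2.getD c 0 + 1)) ∧
    pvInv str1 (pvRemoveFirst c s1)
      (p.1.insert c (p.1.getD c 0 - 1), p.2.insert c (p.2.getD c 0 + 1)) := by
  obtain ⟨hnn, hs1, hav⟩ := hinv
  have havc := hav c
  constructor
  · rw [pvTake, if_pos]; rw [havc]; exact_mod_cast h
  refine ⟨?_, ?_, ?_⟩
  · intro d
    rw [PySem.Dict.getD_insert]
    split_ifs with hd
    · have := hnn c; omega
    · exact hnn d
  · rw [hs1, pvRemoveF_bump]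
    congr 1
    funext y
    rw [PySem.Dict.getD_insert]
    by_cases hy : y = c
    · subst hy
      have := hnn y
      simp [Function.update]
      omega
    · simp [Function.update, hy]
  · intro d
    rw [PySem.Dict.getD_insert, pvRemoveFirst_count c d s1 h]
    split_ifs with hd
    · rw [hd, havc, Nat.cast_sub (by omega : 1 ≤ s1.count c)]
      push_cast
      ring
    · rw [hav d]
      simp [hd]

theorem pvStep_inv (allCase : Bool) (s : Char) (str1 s1 : List Char)
    (p : PySem.Dict Char Int × PySem.Dict Char Int) (hinv : pvInv str1 s1 p) :
    pvInv str1 (pvStepA allCase s1 s) (pvStepB allCase p s) := by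
  by_cases h1 : 0 < s1.count s
  · obtain ⟨heq, hinv'⟩ := pvTake_succ s str1 s1 p hinv h1
    have hne : ¬ s1 = pvRemoveFirst s s1 := fun h => pvRemoveFirst_ne s s1 h1 h.symm
    have hA : pvStepA allCase s1 s = pvRemoveFirst s s1 := by
      cases allCase <;> simp [pvStepA, hne]
    have hB : pvStepB allCase p s =
        (p.1.insert s (p.1.getD s 0 - 1), p.2.insert s (p.2.getD s 0 + 1)) := by
      simp [pvStepB, heq]
    rw [hA, hB]; exact hinv'
  · have h1' : s1.count s = 0 := by omega
    have heq1 := pvTake_fail s str1 s1 p hinv h1'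
    have hr1 : pvRemoveFirst s s1 = s1 := pvRemoveFirst_of_count_zero s s1 h1'
    cases allCase with
    | false =>
      have hA : pvStepA false s1 s = s1 := by simp [pvStepA, hr1]
      have hB : pvStepB false p s = p := by simp [pvStepB, heq1]
      rw [hA, hB]; exact hinv
    | true =>
      by_cases h2 : 0 < s1.count (PySem.Chars.lowerChar s)
      · obtain ⟨heq2, hinv'⟩ := pvTake_succ _ str1 s1 p hinv h2
        have hne2 : ¬ s1 = pvRemoveFirst (PySem.Chars.lowerChar s) s1 :=
          fun h => pvRemoveFirst_ne _ s1 h2 h.symm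
        have hA : pvStepA true s1 s = pvRemoveFirst (PySem.Chars.lowerChar s) s1 := by
          simp [pvStepA, hr1, hne2]
        have hB : pvStepB true p s =
            (p.1.insert (PySem.Chars.lowerChar s) (p.1.getD (PySem.Chars.lowerChar s) 0 - 1),
             p.2.insert (PySem.Chars.lowerChar s) (p.2.getD (PySem.Chars.lowerChar s) 0 + 1)) := by
          simp [pvStepB, heq1, heq2]
        rw [hA, hB]; exact hinv'
      · have h2' : s1.count (PySem.Chars.lowerChar s) = 0 := by omega
        have heq2 := pvTake_fail _ str1 s1 p hinv h2'
        have hr2 : pvRemoveFirst (PySem.Chars.lowerChar s) s1 = s1 :=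
          pvRemoveFirst_of_count_zero _ s1 h2'
        by_cases h3 : 0 < s1.count (PySem.Chars.upperChar s)
        · obtain ⟨heq3, hinv'⟩ := pvTake_succ _ str1 s1 p hinv h3
          have hA : pvStepA true s1 s = pvRemoveFirst (PySem.Chars.upperChar s) s1 := by
            simp [pvStepA, hr1, hr2]
          have hB : pvStepB true p s =
              (p.1.insert (PySem.Chars.upperChar s) (p.1.getD (PySem.Chars.upperChar s) 0 - 1),
               p.2.insert (PySem.Chars.upperChar s) (p.2.getD (PySem.Chars.upperChar s) 0 + 1)) := by
            simp [pvStepB, heq1, heq2, heq3]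
          rw [hA, hB]; exact hinv'
        · have h3' : s1.count (PySem.Chars.upperChar s) = 0 := by omega
          have heq3 := pvTake_fail _ str1 s1 p hinv h3'
          have hr3 : pvRemoveFirst (PySem.Chars.upperChar s) s1 = s1 :=
            pvRemoveFirst_of_count_zero _ s1 h3'
          have hA : pvStepA true s1 s = s1 := by simp [pvStepA, hr1, hr2, hr3]
          have hB : pvStepB true p s = (p.1, p.2) := by simp [pvStepB, heq1, heq2, heq3]
          rw [hA, hB]; exact hinv

theorem pvFold_inv (allCase : Bool) (str2 : List Char) (str1 : List Char) :
    ∀ (s1 : List Char) (p : PySem.Dict Char Int × PySem.Dict Char Int), pvInv str1 s1 p →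
    pvInv str1 (str2.foldl (pvStepA allCase) s1) (str2.foldl (pvStepB allCase) p) := by
  induction str2 with
  | nil => intro s1 p h; exact h
  | cons s rest ih =>
    intro s1 p h
    exact ih _ _ (pvStep_inv allCase s str1 s1 p h)

theorem pvOut_spec (xs : List Char) :
    ∀ (need : PySem.Dict Char Int) (acc : List Char),
    (xs.foldl pvStepOut (need, acc)).2 = acc ++ pvRemoveF (fun c => (need.getD c 0).toNat) xs := by
  induction xs with
  | nil => intro need acc; simp [pvRemoveF]
  | cons x xs ih =>
    intro need acc
    by_cases h : need.getD x 0 > 0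
    · have hpos : 0 < (need.getD x 0).toNat := by omega
      rw [List.foldl_cons, pvStepOut, if_pos h, ih, pvRemoveF, if_pos hpos]
      congr 2
      funext y
      rw [PySem.Dict.getD_insert]
      by_cases hy : y = x
      · subst hy
        simp [Function.update]
      · simp [Function.update, hy]
    · have hz : ¬ 0 < (need.getD x 0).toNat := by omega
      rw [List.foldl_cons, pvStepOut, if_neg h, ih, pvRemoveF, if_neg hz]
      simp

-- ===== VERDICT (by name: the statement is the Claim_ definition above) =====
theorem stringSubtract_spec : Claim_equal_stringSubtract := by
  intro str1 str2 allCase _hdom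
  unfold Spec_stringSubtract stringSubtract stringSubtract_alt
  have hinv0 : pvInv str1.toList str1.toList
      (str1.toList.foldl (fun d c => d.insert c (d.getD c 0 + 1))
        (PySem.Dict.empty : PySem.Dict Char Int), (PySem.Dict.empty : PySem.Dict Char Int)) := by
    refine ⟨?_, ?_, ?_⟩
    · intro c; simp [PySem.Dict.getD_empty]
    · have hz : (fun c => (((PySem.Dict.empty : PySem.Dict Char Int).getD c 0)).toNat)
          = fun _ => 0 := by funext c; simp [PySem.Dict.getD_empty]
      simp only [hz, pvRemoveF_zero]
    · intro c
      rw [PySem.Dict.getD_foldl_insert_add_one, PySem.Dict.getD_empty]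
      simp
  have hinv := pvFold_inv allCase str2.toList str1.toList str1.toList _ hinv0
  simp only [pvOut_spec, List.nil_append]
  rw [← hinv.2.1]
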